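-- pv_equiv track=rewrite | github.com/shaoguangleo/autoFits | pybwlabel.py | FillRunVectors
-- ===== SOURCE A (Python) =====
-- def size(IN):
--     M = len(IN[0])
--     N = len(IN)
--     return (M, N)
--
-- def FillRunVectors(IN):
--     M, N = size(IN)
--     c = []
--     sr = []
--     er = []
--     for cidx ,col in enumerate(IN):
--         k = 0
--         while k < M:
--             try:
--                 k += col[k:].index(1)
--                 c.append(cidx+1)
--                 sr.append(k+1) #! for matlab
--                 try:
--                     k += col[k:].index(0)
--                 except ValueError:
--                     k = M
--                 er.append(k)
--             except ValueError:
--                 break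
--     return sr, er, c
-- ===== SOURCE B (Python) =====
-- def FillRunVectors(IN):
--     # single left-to-right pass per row tracking 0->1 and 1->0 transitions,
--     # scanning bounded by M = width of the first row (as the original does)
--     M = len(IN[0])
--     sr, er, c = [], [], []
--     if M == 0:
--         return sr, er, c
--     for cidx, col in enumerate(IN):
--         in_run = False
--         for i, x in enumerate(col):
--             if not in_run:
--                 if x == 1:
--                     in_run = True
--                     c.append(cidx + 1)
--                     sr.append(i + 1)
--             elif x == 0:
--                 in_run = False
--                 er.append(i)
--                 if i >= M:
--                     break
--         if in_run:
--             er.append(M)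
--     return sr, er, c
-- ===== Notes on version B (the rewrite author's own statement) =====
-- stated objective: alternative
-- what changed: Replaces A's per-row repeated slicing (col[k:]) plus .index jumps with a single left-to-right pass per row that tracks 0->1 and 1->0 transitions with an in-run flag.
import Mathlib
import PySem

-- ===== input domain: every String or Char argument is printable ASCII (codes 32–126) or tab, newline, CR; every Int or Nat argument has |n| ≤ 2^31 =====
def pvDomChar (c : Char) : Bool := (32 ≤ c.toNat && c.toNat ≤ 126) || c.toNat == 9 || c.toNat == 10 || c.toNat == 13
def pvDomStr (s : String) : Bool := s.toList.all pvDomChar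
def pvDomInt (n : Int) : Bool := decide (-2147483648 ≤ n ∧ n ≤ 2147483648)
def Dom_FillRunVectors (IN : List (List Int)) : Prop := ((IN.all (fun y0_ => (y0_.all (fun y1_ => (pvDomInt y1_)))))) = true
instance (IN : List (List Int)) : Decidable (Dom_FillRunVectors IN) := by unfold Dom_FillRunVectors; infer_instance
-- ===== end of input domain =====

-- B changes A's per-row repeated slice-and-index jumps into one linear scan per row
-- tracking 0→1 and 1→0 transitions (objective: alternative).

-- ===== PORT A =====
-- Python helper 'size': (len(IN[0]), len(IN)); IN[0] raises IndexError on [] (excluded by Pre_),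
-- 'none' marks that raise.
def pvSize (IN : List (List Int)) : Option (Int × Int) :=
  (PySem.List.pyGet? IN 0).map (fun r => ((r.length : Int), (IN.length : Int)))

-- the 'while k < M' loop of A for one row: repeated 'k += col[k:].index(1)' /
-- 'k += col[k:].index(0)' jumps; 'none' from index? is Python's ValueError branch.
-- The proof argument 'hk : 0 ≤ k' records that Python's k is never negative (k starts at 0
-- and only grows); it is needed for termination.
def pvWhileA (M : Int) (col : List Int) (cidx : Int) (k : Int) (hk : 0 ≤ k)
    (sr er c : List Int) : List Int × List Int × List Int :=
  if hkM : k < M then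
    match h1 : PySem.List.index? (PySem.List.slice col (some k) none) 1 with
    | none => (sr, er, c)                     -- ValueError: break
    | some i =>
      let k1 : Int := k + i
      let c' := c ++ [cidx + 1]
      let sr' := sr ++ [k1 + 1]
      match h0 : PySem.List.index? (PySem.List.slice col (some k1) none) 0 with
      | none => pvWhileA M col cidx M (le_of_lt (lt_of_le_of_lt hk hkM)) sr' (er ++ [M]) c'
      | some j => pvWhileA M col cidx (k1 + j) (by positivity) sr' (er ++ [k1 + j]) c'
  else (sr, er, c)
termination_by (M - k).toNat
decreasing_by
  · omega
  · -- the second index starts at a cell holding 1, so j ≥ 1 and k strictly grows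
    obtain ⟨hi, hone, -⟩ := PySem.List.getElem_of_index?_eq_some h1
    obtain ⟨hj, hzero, -⟩ := PySem.List.getElem_of_index?_eq_some h0
    have hone' : (PySem.List.slice col (some k) none)[i]? = some 1 := by
      rw [List.getElem?_eq_getElem hi, hone]
    have hzero' : (PySem.List.slice col (some (k + (i : Int))) none)[j]? = some 0 := by
      rw [List.getElem?_eq_getElem hj, hzero]
    rw [PySem.List.slice_from col hk] at hone'
    rw [PySem.List.slice_from col (by positivity)] at hzero'
    have hj1 : 1 ≤ j := by
      by_contra hj0
      have hj0' : j = 0 := by omega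
      subst hj0'
      have hcast : (k + (i : Int)).toNat = k.toNat + i := by omega
      rw [hcast] at hzero'
      simp only [List.getElem?_drop, Nat.add_zero] at hzero' hone'
      rw [hone'] at hzero'
      simp at hzero'
    omega

def FillRunVectors (IN : List (List Int)) : List Int × List Int × List Int :=
  match pvSize IN with
  | none => ([], [], [])                      -- IndexError on empty IN: outside Pre_
  | some (M, _N) =>
    (PySem.List.enumerate IN 0).foldl
      (fun st p =>
        pvWhileA M p.2 p.1 0 (le_refl 0) st.1 st.2.1 st.2.2)
      ([], [], [])

-- ===== PORT B =====
-- one linear pass over a row: absolute index i, flag inRun; a run opens at a 1 seen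
-- outside a run, closes before a 0 seen inside one; the scan stops once a run closes at
-- i ≥ M, and a run still open at the row's end closes at M.
def pvScanB (M cidx : Int) : List Int → Int → Bool → List Int → List Int → List Int →
    List Int × List Int × List Int
  | [], _, inRun, sr, er, c => if inRun then (sr, er ++ [M], c) else (sr, er, c)
  | x :: rest, i, false, sr, er, c =>
    if x = 1 then pvScanB M cidx rest (i + 1) true (sr ++ [i + 1]) er (c ++ [cidx + 1])
    else pvScanB M cidx rest (i + 1) false sr er c
  | x :: rest, i, true, sr, er, c =>
    if x = 0 then
      if M ≤ i then (sr, er ++ [i], c)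
      else pvScanB M cidx rest (i + 1) false sr (er ++ [i]) c
    else pvScanB M cidx rest (i + 1) true sr er c

def FillRunVectors_alt (IN : List (List Int)) : List Int × List Int × List Int :=
  match PySem.List.pyGet? IN 0 with
  | none => ([], [], [])
  | some r0 =>
    let M : Int := r0.length
    if M = 0 then ([], [], [])
    else
      (PySem.List.enumerate IN 0).foldl
        (fun st p => pvScanB M p.1 p.2 0 false st.1 st.2.1 st.2.2)
        ([], [], [])

-- ===== PRECONDITION & SPEC =====
-- Pre_ excludes only the empty list, on which A raises IndexError (IN[0]).
def Pre_FillRunVectors (IN : List (List Int)) : Prop := IN ≠ []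
instance (IN : List (List Int)) : Decidable (Pre_FillRunVectors IN) := by
  unfold Pre_FillRunVectors; infer_instance
def pvWitness_FillRunVectors : List (List Int) := [[1, 0, 1]]

def Spec_FillRunVectors (IN : List (List Int)) (out : List Int × List Int × List Int) : Prop := out = FillRunVectors_alt IN
instance (IN : List (List Int)) (out : List Int × List Int × List Int) : Decidable (Spec_FillRunVectors IN out) := by unfold Spec_FillRunVectors; infer_instance

-- ===== CLAIM (what is proved, stated in full; the proofs are below) =====
def Claim_equal_FillRunVectors : Prop := ∀ (IN : List (List Int)), Dom_FillRunVectors IN → Pre_FillRunVectors IN → Spec_FillRunVectors IN (FillRunVectors IN)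

-- ===== LEMMAS AND PROOFS =====

-- skipping a prefix without 1s leaves the not-in-run scan unchanged
theorem pvScanB_skip_no_one (M cidx : Int) (pre : List Int) (h : 1 ∉ pre) :
    ∀ (l : List Int) (i : Int) (sr er c : List Int),
      pvScanB M cidx (pre ++ l) i false sr er c =
        pvScanB M cidx l (i + pre.length) false sr er c := by
  induction pre with
  | nil => intro l i sr er c; simp
  | cons x xs ih =>
    intro l i sr er c
    have hx : x ≠ 1 := by simp at h; exact Ne.symm h.1
    have hxs : 1 ∉ xs := by simp at h; exact h.2
    simp only [List.cons_append, pvScanB, if_neg hx]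
    have harith : i + 1 + (xs.length : Int) = i + ((x :: xs).length : Int) := by
      push_cast [List.length_cons]; ring
    rw [ih hxs, harith]

-- skipping a prefix without 0s leaves the in-run scan unchanged
theorem pvScanB_skip_no_zero (M cidx : Int) (pre : List Int) (h : 0 ∉ pre) :
    ∀ (l : List Int) (i : Int) (sr er c : List Int),
      pvScanB M cidx (pre ++ l) i true sr er c =
        pvScanB M cidx l (i + pre.length) true sr er c := by
  induction pre with
  | nil => intro l i sr er c; simp
  | cons x xs ih =>
    intro l i sr er c
    have hx : x ≠ 0 := by simp at h; exact Ne.symm h.1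
    have hxs : 0 ∉ xs := by simp at h; exact h.2
    simp only [List.cons_append, pvScanB, if_neg hx]
    have harith : i + 1 + (xs.length : Int) = i + ((x :: xs).length : Int) := by
      push_cast [List.length_cons]; ring
    rw [ih hxs, harith]

-- a tail without 1s adds nothing to a not-in-run scan
theorem pvScanB_no_one (M cidx : Int) (l : List Int) (h : 1 ∉ l) :
    ∀ (i : Int) (sr er c : List Int),
      pvScanB M cidx l i false sr er c = (sr, er, c) := by
  induction l with
  | nil => intro i sr er c; simp [pvScanB]
  | cons x xs ih =>
    intro i sr er c
    have hx : x ≠ 1 := by simp at h; exact Ne.symm h.1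
    have hxs : 1 ∉ xs := by simp at h; exact h.2
    simp only [pvScanB, if_neg hx]
    exact ih hxs _ _ _ _

-- a tail without 0s closes the open run at M
theorem pvScanB_no_zero (M cidx : Int) (l : List Int) (h : 0 ∉ l) :
    ∀ (i : Int) (sr er c : List Int),
      pvScanB M cidx l i true sr er c = (sr, er ++ [M], c) := by
  induction l with
  | nil => intro i sr er c; simp [pvScanB]
  | cons x xs ih =>
    intro i sr er c
    have hx : x ≠ 0 := by simp at h; exact Ne.symm h.1
    have hxs : 0 ∉ xs := by simp at h; exact h.2
    simp only [pvScanB, if_neg hx]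
    exact ih hxs _ _ _ _

-- MAIN per-row lemma: A's jump loop from position k equals B's linear scan of the
-- remaining suffix in the not-in-run state.
theorem pvWhileA_eq_scan (M cidx : Int) (col : List Int) :
    ∀ (n : Nat) (k : Int) (hk : 0 ≤ k), (col.drop k.toNat).length ≤ n → k < M →
      ∀ (sr er c : List Int),
        pvWhileA M col cidx k hk sr er c =
          pvScanB M cidx (col.drop k.toNat) k false sr er c := by
  intro n
  induction n with
  | zero =>
    intro k hk hlen hkM sr er c
    have hnil : col.drop k.toNat = [] := by
      cases h : col.drop k.toNat with
      | nil => rfl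
      | cons a l => rw [h] at hlen; simp at hlen
    rw [pvWhileA, dif_pos hkM]
    rw [PySem.List.slice_from col hk, hnil]
    simp [pvScanB]
  | succ n ih =>
    intro k hk hlen hkM sr er c
    rw [pvWhileA, dif_pos hkM]
    rw [PySem.List.slice_from col hk]
    cases h1 : PySem.List.index? (col.drop k.toNat) 1 with
    | none =>
      have hno : 1 ∉ col.drop k.toNat := (PySem.List.index?_eq_none_iff _ _).mp h1
      rw [pvScanB_no_one M cidx _ hno]
    | some i =>
      obtain ⟨pre, suf, hdecomp, hprelen, hpre⟩ := (PySem.List.index?_eq_some_iff _ _ _).mp h1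
      -- B side: skip pre, open the run at the 1
      rw [hdecomp, pvScanB_skip_no_one M cidx pre hpre, hprelen]
      simp only [pvScanB]
      have hk1 : (0:Int) ≤ k + i := by positivity
      rw [PySem.List.slice_from col hk1]
      have hdropk1 : col.drop (k + (i:Int)).toNat = 1 :: suf := by
        have : (k + (i:Int)).toNat = k.toNat + i := by omega
        rw [this, ← List.drop_drop, hdecomp, ← hprelen, List.drop_append_of_le_length (le_refl _)]
        simp
      rw [hdropk1]
      cases h0 : PySem.List.index? ((1 : Int) :: suf) 0 with
      | none =>
        have hno : (0:Int) ∉ suf := by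
          have := (PySem.List.index?_eq_none_iff _ _).mp h0
          simp at this; exact this
        rw [pvScanB_no_zero M cidx suf hno, pvWhileA, dif_neg (lt_irrefl M)]
        simp
      | some j =>
        obtain ⟨pre2, suf2, hdec2, hlen2, hpre2⟩ := (PySem.List.index?_eq_some_iff _ _ _).mp h0
        -- pre2 starts with the 1 itself
        have hj1 : 1 ≤ j := by
          rcases pre2 with _ | ⟨y, ys⟩
          · simp at hdec2
          · simp at hlen2; omega
        obtain ⟨ys, hys⟩ : ∃ ys, pre2 = (1:Int) :: ys := by
          rcases pre2 with _ | ⟨y, ys⟩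
          · simp at hlen2; omega
          · exact ⟨ys, by simp at hdec2; rw [hdec2.1]⟩
        have hsuf : suf = ys ++ 0 :: suf2 := by
          rw [hys] at hdec2; simpa using hdec2
        have hys0 : (0:Int) ∉ ys := by rw [hys] at hpre2; simp at hpre2; exact hpre2
        have hyslen : (ys.length : Int) = (j : Int) - 1 := by
          rw [hys] at hlen2; simp at hlen2; omega
        rw [hsuf, pvScanB_skip_no_zero M cidx ys hys0]
        -- B is now at the closing 0, absolute index k + i + j
        have hidx : k + (i:Int) + 1 + ys.length = k + (i:Int) + (j:Int) := by omega
        rw [hidx]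
        simp only [pvScanB]
        by_cases hM : M ≤ k + (i:Int) + (j:Int)
        · -- run closes at or past M: both stop
          have : k + (i:Int) + (j:Int) = k + ((i:Int) + (j:Int)) := by ring
          rw [pvWhileA, dif_neg (by omega)]
          simp
          intro h'
          exact absurd h' (not_lt.mpr hM)
        · rw [if_neg hM]
          have hk2 : (0:Int) ≤ k + (i:Int) + (j:Int) := by positivity
          have hdropk2 : col.drop (k + (i:Int) + (j:Int)).toNat = 0 :: suf2 := by
            have : (k + (i:Int) + (j:Int)).toNat = (k + (i:Int)).toNat + j := by omega
            rw [this, ← List.drop_drop, hdropk1, hdec2, hys]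
            have : j = ((1:Int) :: ys).length := by rw [hys] at hlen2; rw [← hlen2]
            rw [this, List.drop_append_of_le_length (le_refl _)]
            simp
          have hlen' : (col.drop (k + (i:Int) + (j:Int)).toNat).length ≤ n := by
            rw [hdropk2]
            have h1len := hlen
            rw [hdecomp, hsuf] at h1len
            simp only [List.length_append, List.length_cons] at h1len
            simp only [List.length_cons]
            omega
          have hih := ih (k + (i:Int) + (j:Int)) hk2 hlen' (by omega)
            (sr ++ [k + (i:Int) + 1]) (er ++ [k + (i:Int) + (j:Int)]) (c ++ [cidx + 1])
          rw [hdropk2] at hih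
          simp only [pvScanB, if_neg (by norm_num : ¬(0:Int) = 1)] at hih
          simp
          exact hih

-- when the first row is empty (M = 0) A's loop is the identity on the fold state
theorem pvWhileA_zero (col : List Int) (cidx : Int) (sr er c : List Int) :
    pvWhileA 0 col cidx 0 (le_refl 0) sr er c = (sr, er, c) := by
  rw [pvWhileA, dif_neg (by omega)]

-- ===== VERDICT (by name: the statement is the Claim_ definition above) =====
theorem FillRunVectors_spec : Claim_equal_FillRunVectors := by
  intro IN _hdom hpre
  unfold Spec_FillRunVectors FillRunVectors FillRunVectors_alt pvSize
  rcases IN with _ | ⟨r0, rows⟩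
  · exact absurd rfl hpre
  · rw [PySem.List.pyGet?_zero_cons]
    simp only [Option.map_some]
    by_cases hM : (r0.length : Int) = 0
    · rw [if_pos hM, hM]
      have : ∀ (l : List (Int × List Int)) (st : List Int × List Int × List Int),
          l.foldl (fun st p => pvWhileA 0 p.2 p.1 0 (le_refl 0) st.1 st.2.1 st.2.2) st = st := by
        intro l
        induction l with
        | nil => intro st; rfl
        | cons p ps ih =>
          intro st
          simp only [List.foldl_cons]
          rw [show pvWhileA 0 p.2 p.1 0 (le_refl 0) st.1 st.2.1 st.2.2 = (st.1, st.2.1, st.2.2) from pvWhileA_zero _ _ _ _ _]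
          exact ih st
      rw [this]
    · rw [if_neg hM]
      have hM' : (0:Int) < (r0.length : Int) := by omega
      apply PySem.List.foldl_congr_mem
      intro st p _hp
      have := pvWhileA_eq_scan (r0.length : Int) p.1 p.2 (p.2.length) 0 (le_refl 0)
        (by simp) hM' st.1 st.2.1 st.2.2
      rw [this]
      simp
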